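-- pv_equiv track=rewrite | github.com/Rafael-Sapienza/computacao | programas/1Semestre/projetoAPC/projeto_v2.py | erroDoEspacoEmBranco
-- ===== SOURCE A (Python) =====
-- def erroDoEspacoEmBranco(s):
--     espacosEmBrancoConsecutivos = []
--     flag = False
--     for i in range(len(s)-1):
--         primeiro = s[i]
--         segundo = s[i+1]
--         if primeiro == ' ' and segundo == ' ':
--             flag = True
--         if segundo != ' ':
--             flag = False
--         if flag:
--             espacosEmBrancoConsecutivos.append(i+1)
--     return espacosEmBrancoConsecutivos
-- ===== SOURCE B (Python) =====
-- def erroDoEspacoEmBranco(s):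
--     res = []
--     i = 0
--     n = len(s)
--     while i < n:
--         if s[i] == ' ':
--             j = i
--             while j < n and s[j] == ' ':
--                 j += 1
--             res.extend(range(i + 1, j))
--             i = j
--         else:
--             i += 1
--     return res
-- ===== Notes on version B (the rewrite author's own statement) =====
-- stated objective: alternative
-- what changed: A scans every adjacent character pair carrying a boolean flag and appends one index per iteration; B walks the string run by run, locating each maximal run of spaces [i, j) and extending the result with range(i+1, j) in one step.
import Mathlib
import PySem

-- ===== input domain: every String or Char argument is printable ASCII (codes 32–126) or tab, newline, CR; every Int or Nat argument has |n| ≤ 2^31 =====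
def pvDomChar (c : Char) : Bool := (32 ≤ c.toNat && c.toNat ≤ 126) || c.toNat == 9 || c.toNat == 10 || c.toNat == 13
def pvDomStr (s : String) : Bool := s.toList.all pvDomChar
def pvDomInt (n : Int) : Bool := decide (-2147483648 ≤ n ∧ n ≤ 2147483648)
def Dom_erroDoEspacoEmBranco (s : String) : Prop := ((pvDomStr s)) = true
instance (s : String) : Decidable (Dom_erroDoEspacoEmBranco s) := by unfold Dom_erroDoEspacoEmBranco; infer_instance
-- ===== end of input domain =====

-- B replaces A's per-character pairwise flag scan by grouping each maximal run of spaces [i, j)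
-- and emitting its index range (i+1, j) at once (objective: alternative).

-- ===== PORT A =====
-- literal port of A: loop over i in range(len(s)-1) carrying (list, flag); s[i]/s[i+1] are
-- always in range on the loop indices, so pyGetD with an arbitrary default is exact here
def erroDoEspacoEmBranco (s : String) : List Int :=
  let cs := s.toList
  let n : Int := cs.length
  let st := (PySem.List.pyRange 0 (n - 1) 1).foldl
    (fun (st : List Int × Bool) i =>
      let primeiro := PySem.List.pyGetD cs i ' '      -- s[i]
      let segundo := PySem.List.pyGetD cs (i + 1) ' '  -- s[i+1]
      let flag := if primeiro = ' ' ∧ segundo = ' ' then true else st.2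
      let flag := if segundo ≠ ' ' then false else flag
      (if flag then st.1 ++ [i + 1] else st.1, flag))
    ([], false)
  st.1

-- ===== PORT B =====
-- inner while of Source B: number of leading spaces (j - i - 1 relative to the run head)
def pvCLS : List Char → Nat
  | [] => 0
  | c :: t => if c = ' ' then pvCLS t + 1 else 0

-- outer while of Source B: i is the absolute index of the head of cs
def pvBScan (cs : List Char) (i : Int) : List Int :=
  match cs with
  | [] => []
  | c :: t =>
    if c = ' ' then
      let k : Nat := pvCLS t + 1          -- run length; j = i + k
      PySem.List.pyRange (i + 1) (i + k) 1 ++ pvBScan (t.drop (k - 1)) (i + k)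
    else pvBScan t (i + 1)
termination_by cs.length
decreasing_by
  all_goals simp

def erroDoEspacoEmBranco_alt (s : String) : List Int := pvBScan s.toList 0

-- ===== PRECONDITION & SPEC =====
def Spec_erroDoEspacoEmBranco (s : String) (out : List Int) : Prop := out = erroDoEspacoEmBranco_alt s
instance (s : String) (out : List Int) : Decidable (Spec_erroDoEspacoEmBranco s out) := by unfold Spec_erroDoEspacoEmBranco; infer_instance

-- ===== CLAIM (what is proved, stated in full; the proofs are below) =====
def Claim_equal_erroDoEspacoEmBranco : Prop := ∀ (s : String), Dom_erroDoEspacoEmBranco s → Spec_erroDoEspacoEmBranco s (erroDoEspacoEmBranco s)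

-- ===== LEMMAS AND PROOFS =====

-- common reference function: walk over consecutive pairs, emit i+1 when both are spaces
def pvG : List Char → Int → List Int
  | [], _ => []
  | [_], _ => []
  | a :: b :: t, i => (if a = ' ' ∧ b = ' ' then [i + 1] else []) ++ pvG (b :: t) (i + 1)

-- A's loop in relative form: Nat indices into cs, absolute offset i0
def pvF (cs : List Char) (i0 : Int) (st : List Int × Bool) : List Int × Bool :=
  (List.range (cs.length - 1)).foldl
    (fun st k =>
      let primeiro := cs.getD k ' '
      let segundo := cs.getD (k + 1) ' '
      let flag := if primeiro = ' ' ∧ segundo = ' ' then true else st.2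
      let flag := if segundo ≠ ' ' then false else flag
      (if flag then st.1 ++ [i0 + k + 1] else st.1, flag)) st

lemma pvA_eq_pvF (s : String) : erroDoEspacoEmBranco s = (pvF s.toList 0 ([], false)).1 := by
  have h1 : ∀ (cs : List Char) (k : Nat), PySem.List.pyGetD cs ((k : Int) + 1) ' ' = cs.getD (k + 1) ' ' := by
    intro cs k; rw [← Nat.cast_add_one, PySem.List.pyGetD_natCast]
  have hlen : (((s.toList.length : Int)) - 1).toNat = s.toList.length - 1 := by omega
  simp only [erroDoEspacoEmBranco, pvF, PySem.List.pyRange_one, List.foldl_map, zero_add,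
    PySem.List.pyGetD_natCast, h1, sub_zero, hlen]

lemma pvF_cons (a b : Char) (t : List Char) (i0 : Int) (st : List Int × Bool) :
    pvF (a :: b :: t) i0 st =
      pvF (b :: t) (i0 + 1)
        (let flag := if a = ' ' ∧ b = ' ' then true else st.2
         let flag := if b ≠ ' ' then false else flag
         (if flag then st.1 ++ [i0 + 1] else st.1, flag)) := by
  unfold pvF
  simp only [List.length_cons, Nat.add_sub_cancel, List.range_succ_eq_map, List.foldl_cons,
    List.foldl_map, List.getD_cons_zero, List.getD_cons_succ, Nat.cast_zero]
  congr 1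
  · funext st k
    simp only [Nat.succ_eq_add_one, Nat.cast_add, Nat.cast_one]
    ring_nf
  · ring_nf

lemma pvF_eq_pvG : ∀ (cs : List Char) (i0 : Int) (acc : List Int) (flag : Bool),
    (flag = true → cs.head? = some ' ') →
    (pvF cs i0 (acc, flag)).1 = acc ++ pvG cs i0
  | [], i0, acc, flag, _ => by simp [pvF, pvG]
  | [a], i0, acc, flag, _ => by simp [pvF, pvG]
  | a :: b :: t, i0, acc, flag, h => by
    rw [pvF_cons]
    simp only
    rw [pvF_eq_pvG _ _ _ _ ?hinv]
    case hinv =>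
      intro hf
      by_cases hb : b = ' ' <;> simp [hb] at hf ⊢
    · simp only [pvG]
      by_cases hb : b = ' '
      · by_cases ha : a = ' '
        · simp [ha, hb]
        · have hf : flag = false := by
            cases flag with
            | false => rfl
            | true => exact absurd (by simpa using h rfl) ha
          simp [ha, hb, hf]
      · simp [hb]

lemma pvG_run : ∀ (t : List Char) (i : Int),
    pvG (' ' :: t) i =
      PySem.List.pyRange (i + 1) (i + (pvCLS t + 1)) 1 ++ pvG (t.drop (pvCLS t)) (i + pvCLS t + 1)
  | [], i => by simp [pvG, pvCLS, PySem.List.pyRange_one_eq_nil]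
  | c :: t', i => by
    by_cases hc : c = ' '
    · subst hc
      have h1 : pvG (' ' :: ' ' :: t') i = [i + 1] ++ pvG (' ' :: t') (i + 1) := by simp [pvG]
      rw [h1, pvG_run t' (i + 1)]
      simp only [pvCLS, reduceIte, List.drop_succ_cons]
      push_cast
      rw [PySem.List.pyRange_one_cons (by omega : (i + 1 : Int) < i + (↑(pvCLS t') + 1 + 1))]
      simp only [List.cons_append, List.nil_append]
      ring_nf
    · simp [pvG, pvCLS, hc, PySem.List.pyRange_one_eq_nil]

lemma pvBScan_eq_pvG : ∀ (n : Nat) (cs : List Char) (i : Int), cs.length ≤ n →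
    pvBScan cs i = pvG cs i
  | 0, cs, i, h => by
    have : cs = [] := List.eq_nil_of_length_eq_zero (Nat.le_zero.mp h)
    subst this; simp [pvBScan, pvG]
  | n + 1, cs, i, h => by
    match cs with
    | [] => simp [pvBScan, pvG]
    | c :: t =>
      rw [pvBScan]
      by_cases hc : c = ' '
      · subst hc
        simp only [Nat.add_sub_cancel]
        rw [pvBScan_eq_pvG n (t.drop (pvCLS t)) _ (by simp at h ⊢; omega)]
        rw [pvG_run]
        push_cast
        ring_nf
      · rw [if_neg hc, pvBScan_eq_pvG n t (i + 1) (by simpa using h)]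
        match t with
        | [] => simp [pvG]
        | b :: t' => simp [pvG, hc]

-- ===== VERDICT (by name: the statement is the Claim_ definition above) =====
theorem erroDoEspacoEmBranco_spec : Claim_equal_erroDoEspacoEmBranco := by
  intro s _
  unfold Spec_erroDoEspacoEmBranco erroDoEspacoEmBranco_alt
  rw [pvA_eq_pvF, pvF_eq_pvG _ _ _ _ (by simp), pvBScan_eq_pvG s.toList.length _ _ le_rfl]
  simp
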